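-- pv_equiv track=rewrite | github.com/jsboigeEpita/2025-Epita-Intelligence-Symbolique | argumentation_analysis/agents/core/governance/social_choice.py | pairwise_matrix
-- ===== SOURCE A (Python) =====
-- from typing import Dict, List, Optional, Tuple
--
-- def pairwise_matrix(
--     ballots: List[List[str]],
--     options: List[str],
-- ) -> Dict[str, Dict[str, int]]:
--     """Build pairwise preference matrix from ballots."""
--     matrix = {a: {b: 0 for b in options if b != a} for a in options}
--     for ballot in ballots:
--         for i, a in enumerate(ballot):
--             if a not in matrix:
--                 continue
--             for b in ballot[i + 1:]:
--                 if b in matrix.get(a, {}):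
--                     matrix[a][b] += 1
--     return matrix
-- ===== SOURCE B (Python) =====
-- def pairwise_matrix(ballots, options):
--     """Build pairwise preference matrix from ballots."""
--     opts_u = dict.fromkeys(options)  # distinct options, O(1) membership
--     counts = {}  # (a, b) -> number of times a precedes b, over all ballots
--     for ballot in ballots:
--         seen = {}  # prefix frequency of options seen so far in this ballot
--         for b in ballot:
--             if b in opts_u:
--                 for a, c in seen.items():
--                     key = (a, b)
--                     counts[key] = counts.get(key, 0) + c
--                 seen[b] = seen.get(b, 0) + 1
--     zeros = {b: 0 for b in options}
--     matrix = {}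
--     for a in options:
--         row = zeros.copy()
--         del row[a]
--         matrix[a] = row
--     for (a, b), c in counts.items():
--         if a != b:
--             matrix[a][b] = c
--     return matrix
-- ===== Notes on version B (the rewrite author's own statement) =====
-- stated objective: faster
-- what changed: Instead of re-scanning the suffix after every ballot position into a dense pre-built matrix, B makes one left-to-right pass per ballot folding a prefix counter of options into a sparse pair tally, then assembles the matrix from cheap copies of a shared zero-row and overlays the tally (intended as faster; a timing run measured 1.9-2.5x at the largest sizes both programs finish).
import Mathlib
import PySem

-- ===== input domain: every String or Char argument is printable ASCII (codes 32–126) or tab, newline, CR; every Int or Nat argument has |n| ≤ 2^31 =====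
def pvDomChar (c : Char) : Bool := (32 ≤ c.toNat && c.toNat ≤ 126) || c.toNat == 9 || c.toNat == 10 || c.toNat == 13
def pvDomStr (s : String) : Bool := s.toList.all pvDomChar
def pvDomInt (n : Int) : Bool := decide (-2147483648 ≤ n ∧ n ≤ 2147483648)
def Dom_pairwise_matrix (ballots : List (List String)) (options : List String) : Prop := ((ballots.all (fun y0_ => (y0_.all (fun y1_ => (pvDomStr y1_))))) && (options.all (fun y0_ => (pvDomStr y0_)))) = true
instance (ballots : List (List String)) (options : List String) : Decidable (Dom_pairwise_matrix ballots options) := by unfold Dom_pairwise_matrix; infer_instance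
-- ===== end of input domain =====

-- B is intended as faster (a timing run measured 1.9-2.5x at the largest sizes both finish): it
-- replaces A's per-position suffix re-scan over a dense pre-built matrix by one left-to-right pass per
-- ballot folding a prefix counter into a sparse pair tally, and assembles the matrix from copies of a
-- shared zero row overlaid with that tally.

-- ===== PORT A =====
def pairwise_matrix (ballots : List (List String)) (options : List String) : List (String × List (String × Int)) :=
  -- matrix = {a: {b: 0 for b in options if b != a} for a in options}
  let matrix : PySem.Dict String (PySem.Dict String Int) :=
    options.foldl (fun m a =>
      m.insert a (options.foldl (fun d b => if b ≠ a then d.insert b (0 : Int) else d)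
        PySem.Dict.empty)) PySem.Dict.empty
  -- for ballot in ballots: for i, a in enumerate(ballot): … for b in ballot[i+1:]: …
  let matrix := ballots.foldl (fun m ballot =>
    (PySem.List.enumerate ballot).foldl (fun m ia =>
      if m.contains ia.2 then
        (PySem.List.slice ballot (some (ia.1 + 1)) none).foldl (fun m b =>
          if (m.getD ia.2 PySem.Dict.empty).contains b then
            m.modify ia.2 PySem.Dict.empty (fun d => d.modify b 0 (· + 1))
          else m) m
      else m) m) matrix
  matrix.items.map (fun p => (p.1, p.2.items))

-- ===== PORT B =====
def pairwise_matrix_alt (ballots : List (List String)) (options : List String) : List (String × List (String × Int)) :=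
  -- opts_u = dict.fromkeys(options): the distinct options, used for membership tests
  let opts_u : List String := PySem.List.dedup options
  -- one pass per ballot: fold the prefix counter `seen` into the pair tally `counts`
  let counts : PySem.Dict (String × String) Int :=
    ballots.foldl (fun counts ballot =>
      (ballot.foldl
        (fun (st : PySem.Dict (String × String) Int × PySem.Dict String Int) b =>
          if opts_u.contains b then
            (st.2.items.foldl (fun c ac => c.insert (ac.1, b) (c.getD (ac.1, b) 0 + ac.2)) st.1,
             st.2.insert b (st.2.getD b 0 + 1))
          else st)
        (counts, PySem.Dict.empty)).1) PySem.Dict.empty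
  -- zeros = {b: 0 for b in options}; each row is a copy of it with the key itself removed
  let zeros : PySem.Dict String Int :=
    options.foldl (fun d b => d.insert b (0 : Int)) PySem.Dict.empty
  let matrix : PySem.Dict String (PySem.Dict String Int) :=
    options.foldl (fun m a => m.insert a (zeros.erase a)) PySem.Dict.empty
  -- overlay the sparse tally: matrix[a][b] = c
  let matrix := counts.items.foldl (fun m kc =>
    if kc.1.1 ≠ kc.1.2 then
      m.modify kc.1.1 PySem.Dict.empty (fun row => row.insert kc.1.2 kc.2)
    else m) matrix
  matrix.items.map (fun p => (p.1, p.2.items))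

-- ===== PRECONDITION & SPEC =====
def Spec_pairwise_matrix (ballots : List (List String)) (options : List String) (out : List (String × List (String × Int))) : Prop := out = pairwise_matrix_alt ballots options
instance (ballots : List (List String)) (options : List String) (out : List (String × List (String × Int))) : Decidable (Spec_pairwise_matrix ballots options out) := by unfold Spec_pairwise_matrix; infer_instance

-- ===== CLAIM (what is proved, stated in full; the proofs are below) =====
def Claim_equal_pairwise_matrix : Prop := ∀ (ballots : List (List String)) (options : List String), Dom_pairwise_matrix ballots options → Spec_pairwise_matrix ballots options (pairwise_matrix ballots options)

-- ===== LEMMAS AND PROOFS =====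

/-- The inner dict `{b: f a b for b in options if b != a}`. -/
def innerF (opts : List String) (f : String → String → Int) (a : String) : PySem.Dict String Int :=
  opts.foldl (fun d b => if b ≠ a then d.insert b (f a b) else d) PySem.Dict.empty

/-- The matrix `{a: {b: f a b for b in options if b != a} for a in options}`. -/
def buildM (opts : List String) (f : String → String → Int) : PySem.Dict String (PySem.Dict String Int) :=
  opts.foldl (fun m a => m.insert a (innerF opts f a)) PySem.Dict.empty

/-- Number of pairs i < j with ballot[i] = a and ballot[j] = b (A's traversal order: per
position of `a`, count `b` in the suffix). -/
def cnt1 : List String → String → String → Int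
  | [], _, _ => 0
  | x :: t, a, b => (if x = a then (t.count b : Int) else 0) + cnt1 t a b

/-- The prefix counter `seen` after processing a prefix `p` (literally B's update). -/
def counter (p : List String) : PySem.Dict String Int :=
  p.foldl (fun d x => d.insert x (d.getD x 0 + 1)) PySem.Dict.empty

lemma innerF_getD_aux (opts : List String) (f : String → String → Int) (a b : String)
    (d : PySem.Dict String Int) :
    (opts.foldl (fun d x => if x ≠ a then d.insert x (f a x) else d) d).getD b 0
      = if b ∈ opts ∧ b ≠ a then f a b else d.getD b 0 := by
  induction opts generalizing d with
  | nil => simp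
  | cons z t ih =>
    rw [List.foldl_cons, ih]
    by_cases hbt : b ∈ t ∧ b ≠ a
    · simp [hbt]
    · rw [if_neg hbt]
      by_cases hz : z = a
      · subst hz
        simp only [ne_eq, not_true_eq_false, if_false]
        have hnc : ¬ (b ∈ z :: t ∧ b ≠ z) := by
          rintro ⟨hm, hne⟩
          rcases List.mem_cons.mp hm with h | h
          · exact hne h
          · exact hbt ⟨h, hne⟩
        rw [if_neg hnc]
      · simp only [ne_eq, hz, not_false_eq_true, if_true]
        rw [PySem.Dict.getD_insert]
        by_cases hbz : b = z
        · subst hbz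
          have hc : b ∈ b :: t ∧ b ≠ a := ⟨List.mem_cons_self, hz⟩
          simp [hc]
        · have hnc : ¬ (b ∈ z :: t ∧ b ≠ a) := by
            rintro ⟨hm, hne⟩
            rcases List.mem_cons.mp hm with h | h
            · exact hbz h
            · exact hbt ⟨h, hne⟩
          simp only [hbz, if_false, if_neg hnc]

lemma innerF_getD (opts : List String) (f : String → String → Int) (a b : String) :
    (innerF opts f a).getD b 0 = if b ∈ opts ∧ b ≠ a then f a b else 0 := by
  have := innerF_getD_aux opts f a b PySem.Dict.empty
  simpa [innerF, PySem.Dict.getD_empty] using this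

lemma innerF_contains_aux (opts : List String) (f : String → String → Int) (a b : String)
    (d : PySem.Dict String Int) :
    (opts.foldl (fun d x => if x ≠ a then d.insert x (f a x) else d) d).contains b
      = (decide (b ∈ opts ∧ b ≠ a) || d.contains b) := by
  induction opts generalizing d with
  | nil => simp
  | cons z t ih =>
    rw [List.foldl_cons, ih]
    by_cases hz : z = a
    · subst hz
      simp only [ne_eq, not_true_eq_false, if_false]
      congr 1
      simp only [decide_eq_decide, List.mem_cons]
      constructor
      · rintro ⟨h, hne⟩; exact ⟨Or.inr h, hne⟩
      · rintro ⟨h, hne⟩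
        rcases h with h | h
        · exact absurd h hne
        · exact ⟨h, hne⟩
    · simp only [ne_eq, hz, not_false_eq_true, if_true]
      rw [PySem.Dict.contains_insert]
      by_cases hbz : b = z
      · subst hbz
        have hc : b ∈ b :: t ∧ b ≠ a := ⟨List.mem_cons_self, hz⟩
        simp [hc]
      · have heq : (b ∈ z :: t ∧ b ≠ a) ↔ (b ∈ t ∧ b ≠ a) := by
          simp only [List.mem_cons]
          constructor
          · rintro ⟨h | h, hne⟩
            · exact absurd h hbz
            · exact ⟨h, hne⟩
          · rintro ⟨h, hne⟩; exact ⟨Or.inr h, hne⟩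
        have : (b == z) = false := by simp [hbz]
        rw [this]
        simp only [Bool.false_or]
        congr 1
        simp [hbz]

lemma innerF_contains (opts : List String) (f : String → String → Int) (a b : String) :
    (innerF opts f a).contains b = decide (b ∈ opts ∧ b ≠ a) := by
  have := innerF_contains_aux opts f a b PySem.Dict.empty
  simpa [innerF, PySem.Dict.contains_empty] using this

lemma innerF_keys_aux (opts : List String) (f g : String → String → Int) (a : String)
    (d d' : PySem.Dict String Int) (h : d.keys = d'.keys) :
    (opts.foldl (fun d x => if x ≠ a then d.insert x (f a x) else d) d).keys
      = (opts.foldl (fun d x => if x ≠ a then d.insert x (g a x) else d) d').keys := by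
  induction opts generalizing d d' with
  | nil => simpa using h
  | cons z t ih =>
    rw [List.foldl_cons, List.foldl_cons]
    by_cases hz : z = a
    · subst hz
      simp only [ne_eq, not_true_eq_false, if_false]
      exact ih d d' h
    · simp only [ne_eq, hz, not_false_eq_true, if_true]
      apply ih
      by_cases hc : d.contains z
      · have hc' : d'.contains z := by
          rw [PySem.Dict.contains_iff_mem_keys] at hc ⊢
          rwa [← h]
        rw [PySem.Dict.keys_insert_of_contains _ _ hc, PySem.Dict.keys_insert_of_contains _ _ hc']
        exact h
      · have hc' : d'.contains z = false := by
          rw [Bool.eq_false_iff]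
          intro hcc
          rw [PySem.Dict.contains_iff_mem_keys] at hcc
          rw [← h, ← PySem.Dict.contains_iff_mem_keys] at hcc
          simp [hcc] at hc
        rw [PySem.Dict.keys_insert_of_not_contains _ _ (Bool.eq_false_iff.mpr hc),
            PySem.Dict.keys_insert_of_not_contains _ _ hc', h]

lemma innerF_keys (opts : List String) (f g : String → String → Int) (a : String) :
    (innerF opts f a).keys = (innerF opts g a).keys := by
  exact innerF_keys_aux opts f g a PySem.Dict.empty PySem.Dict.empty rfl

lemma innerF_nodup (opts : List String) (f : String → String → Int) (a : String) :
    (innerF opts f a).keys.Nodup := by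
  unfold innerF
  suffices h : ∀ (d : PySem.Dict String Int), d.keys.Nodup →
      (opts.foldl (fun d b => if b ≠ a then d.insert b (f a b) else d) d).keys.Nodup from
    h _ PySem.Dict.nodup_keys_empty
  induction opts with
  | nil => intro d hd; simpa using hd
  | cons z t ih =>
    intro d hd
    rw [List.foldl_cons]
    apply ih
    by_cases hz : z ≠ a
    · rw [if_pos hz]; exact PySem.Dict.nodup_keys_insert _ _ _ hd
    · rwa [if_neg hz]

lemma innerF_congr (opts : List String) (f g : String → String → Int) (a : String)
    (h : ∀ y ∈ opts, y ≠ a → f a y = g a y) : innerF opts f a = innerF opts g a := by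
  unfold innerF
  apply PySem.List.foldl_congr_mem
  intro acc x hx
  by_cases hxa : x ≠ a
  · rw [if_pos hxa, if_pos hxa, h x hx hxa]
  · rw [if_neg hxa, if_neg hxa]

/-- Bump f at the single cell (a, b). -/
def bump (f : String → String → Int) (a b : String) : String → String → Int :=
  fun x y => if x = a ∧ y = b then f x y + 1 else f x y

lemma innerF_modify (opts : List String) (f : String → String → Int) (a b : String)
    (hb : b ∈ opts) (hba : b ≠ a) :
    (innerF opts f a).modify b 0 (· + 1) = innerF opts (bump f a b) a := by
  have hkeysmod : ((innerF opts f a).modify b 0 (· + 1)).keys = (innerF opts f a).keys := by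
    rw [PySem.Dict.keys_modify]
    apply PySem.Dict.keys_insert_of_contains
    rw [innerF_contains]
    simp [hb, hba]
  have hkeys2 : (innerF opts f a).keys = (innerF opts (bump f a b) a).keys :=
    innerF_keys opts f (bump f a b) a
  apply PySem.Dict.ext
  rw [PySem.Dict.items_eq_map_keys _ (by rw [hkeysmod]; exact innerF_nodup opts f a) 0,
      PySem.Dict.items_eq_map_keys _ (innerF_nodup opts (bump f a b) a) 0, hkeysmod, hkeys2]
  apply List.map_congr_left
  intro k hk
  have hkm : k ∈ opts ∧ k ≠ a := by
    rw [← PySem.Dict.contains_iff_mem_keys, innerF_contains] at hk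
    exact of_decide_eq_true hk
  have hrw : ∀ (g' : String → String → Int), (innerF opts g' a).getD k 0 = g' a k := by
    intro g'; rw [innerF_getD, if_pos hkm]
  congr 1
  rw [PySem.Dict.getD_modify]
  by_cases hkb : k = b
  · subst hkb
    rw [if_pos rfl, hrw, hrw, bump]
    simp
  · rw [if_neg hkb, hrw, hrw, bump]
    simp [hkb]

lemma buildM_getD_aux (l opts : List String) (f : String → String → Int) (a : String)
    (m : PySem.Dict String (PySem.Dict String Int)) :
    (l.foldl (fun m x => m.insert x (innerF opts f x)) m).getD a PySem.Dict.empty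
      = if a ∈ l then innerF opts f a else m.getD a PySem.Dict.empty := by
  induction l generalizing m with
  | nil => simp
  | cons z t ih =>
    rw [List.foldl_cons, ih]
    by_cases hat : a ∈ t
    · simp [hat]
    · rw [if_neg hat, PySem.Dict.getD_insert]
      by_cases haz : a = z
      · simp [haz]
      · simp [haz, hat]

lemma buildM_getD (opts : List String) (f : String → String → Int) (a : String) (ha : a ∈ opts) :
    (buildM opts f).getD a PySem.Dict.empty = innerF opts f a := by
  rw [buildM, buildM_getD_aux, if_pos ha]

lemma buildM_contains_aux (l opts : List String) (f : String → String → Int) (a : String)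
    (m : PySem.Dict String (PySem.Dict String Int)) :
    (l.foldl (fun m x => m.insert x (innerF opts f x)) m).contains a
      = (decide (a ∈ l) || m.contains a) := by
  induction l generalizing m with
  | nil => simp
  | cons z t ih =>
    rw [List.foldl_cons, ih, PySem.Dict.contains_insert]
    by_cases haz : a = z
    · simp [haz]
    · have hf : (a == z) = false := by simp [haz]
      rw [hf]
      simp [List.mem_cons, haz]

lemma buildM_contains (opts : List String) (f : String → String → Int) (a : String) :
    (buildM opts f).contains a = decide (a ∈ opts) := by
  rw [buildM, buildM_contains_aux]
  simp

lemma buildM_keys_aux (l : List String) (v v' : String → PySem.Dict String Int)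
    (m m' : PySem.Dict String (PySem.Dict String Int)) (h : m.keys = m'.keys) :
    (l.foldl (fun m x => m.insert x (v x)) m).keys
      = (l.foldl (fun m x => m.insert x (v' x)) m').keys := by
  induction l generalizing m m' with
  | nil => simpa using h
  | cons z t ih =>
    rw [List.foldl_cons, List.foldl_cons]
    apply ih
    by_cases hc : m.contains z
    · have hc' : m'.contains z := by
        rw [PySem.Dict.contains_iff_mem_keys] at hc ⊢
        rwa [← h]
      rw [PySem.Dict.keys_insert_of_contains _ _ hc, PySem.Dict.keys_insert_of_contains _ _ hc']
      exact h
    · have hc' : m'.contains z = false := by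
        rw [Bool.eq_false_iff]
        intro hcc
        rw [PySem.Dict.contains_iff_mem_keys] at hcc
        rw [← h, ← PySem.Dict.contains_iff_mem_keys] at hcc
        simp [hcc] at hc
      rw [PySem.Dict.keys_insert_of_not_contains _ _ (Bool.eq_false_iff.mpr hc),
          PySem.Dict.keys_insert_of_not_contains _ _ hc', h]

lemma buildM_keys (opts : List String) (f g : String → String → Int) :
    (buildM opts f).keys = (buildM opts g).keys := by
  exact buildM_keys_aux opts _ _ PySem.Dict.empty PySem.Dict.empty rfl

lemma buildM_nodup (opts : List String) (f : String → String → Int) :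
    (buildM opts f).keys.Nodup := by
  exact PySem.Dict.nodup_keys_foldl_insert opts (fun _ x => innerF opts f x) _
    PySem.Dict.nodup_keys_empty

lemma buildM_congr (opts : List String) (f g : String → String → Int)
    (h : ∀ a ∈ opts, ∀ b ∈ opts, b ≠ a → f a b = g a b) : buildM opts f = buildM opts g := by
  unfold buildM
  apply PySem.List.foldl_congr_mem
  intro acc x hx
  rw [innerF_congr opts f g x (fun y hy hyx => h x hx y hy hyx)]

lemma buildM_modify (opts : List String) (f : String → String → Int) (a b : String)
    (ha : a ∈ opts) (hb : b ∈ opts) (hba : b ≠ a) :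
    (buildM opts f).modify a PySem.Dict.empty (fun d => d.modify b 0 (· + 1))
      = buildM opts (bump f a b) := by
  have hkeysmod : ((buildM opts f).modify a PySem.Dict.empty
      (fun d => d.modify b 0 (· + 1))).keys = (buildM opts f).keys := by
    rw [PySem.Dict.keys_modify]
    apply PySem.Dict.keys_insert_of_contains
    rw [buildM_contains]
    simpa using ha
  apply PySem.Dict.ext
  rw [PySem.Dict.items_eq_map_keys _ (by rw [hkeysmod]; exact buildM_nodup opts f)
        PySem.Dict.empty,
      PySem.Dict.items_eq_map_keys _ (buildM_nodup opts (bump f a b)) PySem.Dict.empty,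
      hkeysmod, buildM_keys opts f (bump f a b)]
  apply List.map_congr_left
  intro k hk
  have hkm : k ∈ opts := by
    rw [← PySem.Dict.contains_iff_mem_keys, buildM_contains] at hk
    exact of_decide_eq_true hk
  congr 1
  rw [PySem.Dict.getD_modify, buildM_getD opts (bump f a b) k hkm]
  by_cases hka : k = a
  · subst hka
    rw [if_pos rfl, buildM_getD opts f k hkm, innerF_modify opts f k b hb hba]
  · rw [if_neg hka, buildM_getD opts f k hkm]
    apply innerF_congr
    intro y hy hyk
    rw [bump]
    simp [hka]

/-- A's innermost loop over a suffix, from a buildM state. -/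
lemma A_suffix_fold (opts : List String) (suffix : List String) (f : String → String → Int)
    (a : String) (ha : a ∈ opts) :
    suffix.foldl (fun m b =>
        if (m.getD a PySem.Dict.empty).contains b then
          m.modify a PySem.Dict.empty (fun d => d.modify b 0 (· + 1))
        else m) (buildM opts f)
      = buildM opts (fun x y =>
          f x y + if x = a ∧ y ∈ opts ∧ y ≠ a then (suffix.count y : Int) else 0) := by
  induction suffix generalizing f with
  | nil =>
    rw [List.foldl_nil]
    congr 1
    funext x y
    simp
  | cons b rest ih =>
    rw [List.foldl_cons]
    have hcond : ((buildM opts f).getD a PySem.Dict.empty).contains b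
        = decide (b ∈ opts ∧ b ≠ a) := by
      rw [buildM_getD opts f a ha, innerF_contains]
    by_cases hb : b ∈ opts ∧ b ≠ a
    · rw [hcond, decide_eq_true hb, if_pos rfl,
        buildM_modify opts f a b ha hb.1 hb.2, ih]
      congr 1
      funext x y
      rw [bump]
      by_cases hxy : x = a ∧ y ∈ opts ∧ y ≠ a
      · rw [if_pos hxy, if_pos hxy]
        by_cases hyb : y = b
        · subst hyb
          rw [if_pos ⟨hxy.1, rfl⟩]
          simp
          ring
        · rw [if_neg (fun h => hyb h.2)]
          have hby : ¬ b = y := fun h => hyb h.symm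
          simp [hby]
      · rw [if_neg hxy, if_neg hxy]
        by_cases hxab : x = a ∧ y = b
        · exact absurd ⟨hxab.1, hxab.2 ▸ hb.1, hxab.2 ▸ hb.2⟩ hxy
        · rw [if_neg hxab]
    · rw [hcond, decide_eq_false hb, if_neg (by simp), ih]
      congr 1
      funext x y
      by_cases hxy : x = a ∧ y ∈ opts ∧ y ≠ a
      · rw [if_pos hxy, if_pos hxy]
        have hyb : y ≠ b := by rintro rfl; exact hb ⟨hxy.2.1, hxy.2.2⟩
        have hby : ¬ b = y := fun h => hyb h.symm
        simp [hby]
      · rw [if_neg hxy, if_neg hxy]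

/-- A's per-ballot enumerate loop, generalized over the processed prefix. -/
lemma A_enum_fold (opts : List String) (ballot : List String) :
    ∀ (rest pre : List String), ballot = pre ++ rest →
    ∀ (f : String → String → Int),
    (PySem.List.enumerate rest (pre.length : Int)).foldl (fun m ia =>
        if m.contains ia.2 then
          (PySem.List.slice ballot (some (ia.1 + 1)) none).foldl (fun m b =>
            if (m.getD ia.2 PySem.Dict.empty).contains b then
              m.modify ia.2 PySem.Dict.empty (fun d => d.modify b 0 (· + 1))
            else m) m
        else m) (buildM opts f)
      = buildM opts (fun x y =>
          f x y + if x ∈ opts ∧ y ∈ opts ∧ y ≠ x then cnt1 rest x y else 0) := by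
  intro rest
  induction rest with
  | nil =>
    intro pre hpre f
    rw [show PySem.List.enumerate ([] : List String) (pre.length : Int) = [] from rfl,
      List.foldl_nil]
    congr 1
    funext x y
    simp [cnt1]
  | cons a rest' ih =>
    intro pre hpre f
    have hpre' : ballot = (pre ++ [a]) ++ rest' := by
      rw [hpre, List.append_cons]
    rw [PySem.List.enumerate_cons, List.foldl_cons]
    have hsl : PySem.List.slice ballot (some ((pre.length : Int) + 1)) none = rest' := by
      rw [show PySem.List.slice ballot (some ((pre.length : Int) + 1)) none
            = List.drop ((pre.length : Int) + 1).toNat ballot from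
          PySem.List.slice_from ballot (by omega)]
      have h1 : ((pre.length : Int) + 1).toNat = (pre ++ [a]).length := by
        simp
      rw [h1, hpre', List.drop_left]
    have hlen : (pre.length : Int) + 1 = ((pre ++ [a]).length : Int) := by
      simp
    by_cases hao : a ∈ opts
    · rw [buildM_contains, decide_eq_true hao, if_pos rfl, hsl,
        A_suffix_fold opts rest' f a hao, hlen, ih (pre ++ [a]) hpre']
      congr 1
      funext x y
      by_cases hc : x ∈ opts ∧ y ∈ opts ∧ y ≠ x
      · rw [if_pos hc, if_pos hc]
        by_cases hxa : x = a
        · subst hxa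
          rw [if_pos ⟨rfl, hc.2.1, hc.2.2⟩]
          simp [cnt1]
          ring
        · rw [if_neg (fun h => hxa h.1)]
          have hax : ¬ a = x := fun h => hxa h.symm
          simp [cnt1, hax]
      · rw [if_neg hc, if_neg hc]
        by_cases hd : x = a ∧ y ∈ opts ∧ y ≠ a
        · exact absurd ⟨hd.1 ▸ hao, hd.2.1, hd.1 ▸ hd.2.2⟩ hc
        · rw [if_neg hd]
          ring
    · rw [buildM_contains, decide_eq_false hao, if_neg (by simp), hlen,
        ih (pre ++ [a]) hpre']
      congr 1
      funext x y
      by_cases hc : x ∈ opts ∧ y ∈ opts ∧ y ≠ x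
      · rw [if_pos hc, if_pos hc]
        have hxa : x ≠ a := by rintro rfl; exact hao hc.1
        have hax : ¬ a = x := fun h => hxa h.symm
        simp [cnt1, hax]
      · rw [if_neg hc, if_neg hc]

/-- A's outer loop over the ballots. -/
lemma A_ballots_fold (opts : List String) (ballots : List (List String))
    (f : String → String → Int) :
    ballots.foldl (fun m ballot =>
        (PySem.List.enumerate ballot).foldl (fun m ia =>
          if m.contains ia.2 then
            (PySem.List.slice ballot (some (ia.1 + 1)) none).foldl (fun m b =>
              if (m.getD ia.2 PySem.Dict.empty).contains b then
                m.modify ia.2 PySem.Dict.empty (fun d => d.modify b 0 (· + 1))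
              else m) m
          else m) m) (buildM opts f)
      = buildM opts (fun x y =>
          f x y + if x ∈ opts ∧ y ∈ opts ∧ y ≠ x
            then ((ballots.map (fun bl => cnt1 bl x y)).sum) else 0) := by
  induction ballots generalizing f with
  | nil =>
    rw [List.foldl_nil]
    congr 1
    funext x y
    simp
  | cons ballot rest ih =>
    rw [List.foldl_cons]
    have h0 : PySem.List.enumerate ballot = PySem.List.enumerate ballot
        ((([] : List String).length : Int)) := by norm_num
    rw [h0, A_enum_fold opts ballot ballot [] rfl f, ih]
    congr 1
    funext x y
    by_cases hc : x ∈ opts ∧ y ∈ opts ∧ y ≠ x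
    · rw [if_pos hc, if_pos hc, if_pos hc]
      push_cast [List.map_cons, List.sum_cons]
      ring
    · rw [if_neg hc, if_neg hc, if_neg hc]
      ring

lemma cnt1_append_singleton (p : List String) (b x y : String) :
    cnt1 (p ++ [b]) x y = cnt1 p x y + if y = b then (p.count x : Int) else 0 := by
  induction p with
  | nil => simp [cnt1]
  | cons z p ih =>
    rw [List.cons_append]
    simp only [cnt1]
    rw [ih]
    by_cases hzx : z = x <;> by_cases hyb : y = b <;>
        simp [hzx, hyb, List.count_append, List.count_cons] <;> try ring
    exact fun h => hyb h.symm

lemma counter_getD_aux (p : List String) (x : String) (d : PySem.Dict String Int) :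
    (p.foldl (fun d z => d.insert z (d.getD z 0 + 1)) d).getD x 0
      = d.getD x 0 + (p.count x : Int) := by
  induction p generalizing d with
  | nil => simp
  | cons z p ih =>
    rw [List.foldl_cons, ih, PySem.Dict.getD_insert]
    by_cases hxz : x = z
    · subst hxz
      simp
      ring
    · have hzx : ¬ z = x := fun h => hxz h.symm
      simp [hxz, hzx]

lemma counter_getD (p : List String) (x : String) :
    (counter p).getD x 0 = (p.count x : Int) := by
  rw [counter, counter_getD_aux, PySem.Dict.getD_empty]
  ring

lemma counter_nodup (p : List String) : (counter p).keys.Nodup := by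
  unfold counter
  exact PySem.Dict.nodup_keys_foldl_insert p (fun d x => d.getD x 0 + 1) _
    PySem.Dict.nodup_keys_empty

lemma counter_append_singleton (p : List String) (b : String) :
    counter (p ++ [b]) = (counter p).insert b ((counter p).getD b 0 + 1) := by
  rw [counter, List.foldl_append, List.foldl_cons, List.foldl_nil]
  rfl

lemma sum_filter_map_nodup (ks : List String) (h : ks.Nodup) (v : String → Int) (x : String) :
    (((ks.map (fun k => (k, v k))).filter (fun ac => ac.1 = x)).map (·.2)).sum
      = if x ∈ ks then v x else 0 := by
  induction ks with
  | nil => simp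
  | cons k t ih =>
    rw [List.nodup_cons] at h
    simp only [List.map_cons, List.filter_cons]
    by_cases hkx : k = x
    · subst hkx
      have hnt : k ∉ t := h.1
      have hd : (decide (k = k)) = true := by simp
      rw [hd, if_pos rfl, List.map_cons, List.sum_cons, ih h.2]
      simp [hnt]
    · have hd : (decide (k = x)) = false := by simp [hkx]
      rw [hd]
      simp only [Bool.false_eq_true, if_false]
      rw [ih h.2]
      have hxk : ¬ x = k := fun h' => hkx h'.symm
      simp [List.mem_cons, hxk]

/-- Sum of the values of the items with key `x` equals the lookup, for a nodup-key dict. -/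
lemma sum_items_key (d : PySem.Dict String Int) (h : d.keys.Nodup) (x : String) :
    ((d.items.filter (fun ac => ac.1 = x)).map (·.2)).sum = d.getD x 0 := by
  rw [PySem.Dict.items_eq_map_keys d h 0,
    sum_filter_map_nodup d.keys h (fun k => d.getD k 0) x]
  by_cases hx : x ∈ d.keys
  · rw [if_pos hx]
  · rw [if_neg hx, PySem.Dict.getD_of_not_contains]
    rw [Bool.eq_false_iff]
    intro hc
    exact hx ((PySem.Dict.contains_iff_mem_keys d x).mp hc)

/-- B's items loop: folding `seen.items` into `counts` at second component `b`. -/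
lemma B_items_fold (l : List (String × Int)) (counts : PySem.Dict (String × String) Int)
    (b : String) (x y : String) :
    (l.foldl (fun c ac => c.insert (ac.1, b) (c.getD (ac.1, b) 0 + ac.2)) counts).getD (x, y) 0
      = counts.getD (x, y) 0
        + if y = b then (((l.filter (fun ac => ac.1 = x)).map (·.2)).sum) else 0 := by
  induction l generalizing counts with
  | nil => simp
  | cons ac t ih =>
    rw [List.foldl_cons, ih, PySem.Dict.getD_insert]
    simp only [List.filter_cons]
    by_cases hx : ac.1 = x
    · subst hx
      by_cases hyb : y = b
      · subst hyb
        rw [if_pos rfl]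
        simp [List.map_cons]
        ring
      · have hpair : (ac.1, y) ≠ (ac.1, b) := by simp [hyb]
        rw [if_neg hpair]
        simp [hyb]
    · have hpair : (x, y) ≠ (ac.1, b) := by
        simp only [ne_eq, Prod.mk.injEq, not_and]
        intro h
        exact absurd h.symm hx
      rw [if_neg hpair]
      have hd : (decide (ac.1 = x)) = false := by simp [hx]
      simp [hd]

lemma B_ballot_fold_getD (rest : List String) :
    ∀ (p : List String) (counts : PySem.Dict (String × String) Int) (x y : String),
    ((rest.foldl
        (fun (st : PySem.Dict (String × String) Int × PySem.Dict String Int) b =>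
          (st.2.items.foldl (fun c ac => c.insert (ac.1, b) (c.getD (ac.1, b) 0 + ac.2)) st.1,
           st.2.insert b (st.2.getD b 0 + 1)))
        (counts, counter p)).1).getD (x, y) 0
      = counts.getD (x, y) 0 + (cnt1 (p ++ rest) x y - cnt1 p x y) := by
  induction rest with
  | nil => intro p counts x y; simp
  | cons b rest' ih =>
    intro p counts x y
    simp only [List.foldl_cons]
    rw [← counter_append_singleton p b,
      ih (p ++ [b]) ((counter p).items.foldl
        (fun c ac => c.insert (ac.1, b) (c.getD (ac.1, b) 0 + ac.2)) counts) x y,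
      B_items_fold, sum_items_key (counter p) (counter_nodup p) x, counter_getD,
      cnt1_append_singleton, ← List.append_cons]
    ring

lemma B_counts_getD (ballots : List (List String)) :
    ∀ (counts : PySem.Dict (String × String) Int) (x y : String),
    (ballots.foldl (fun counts ballot =>
        (ballot.foldl
          (fun (st : PySem.Dict (String × String) Int × PySem.Dict String Int) b =>
            (st.2.items.foldl (fun c ac => c.insert (ac.1, b) (c.getD (ac.1, b) 0 + ac.2)) st.1,
             st.2.insert b (st.2.getD b 0 + 1)))
          (counts, PySem.Dict.empty)).1) counts).getD (x, y) 0
      = counts.getD (x, y) 0 + ((ballots.map (fun bl => cnt1 bl x y)).sum) := by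
  induction ballots with
  | nil => intro counts x y; simp
  | cons bl rest ih =>
    intro counts x y
    simp only [List.foldl_cons]
    have hb0 : ∀ (c : PySem.Dict (String × String) Int),
        ((bl.foldl
          (fun (st : PySem.Dict (String × String) Int × PySem.Dict String Int) b =>
            (st.2.items.foldl (fun c ac => c.insert (ac.1, b) (c.getD (ac.1, b) 0 + ac.2)) st.1,
             st.2.insert b (st.2.getD b 0 + 1)))
          (c, PySem.Dict.empty)).1).getD (x, y) 0
          = c.getD (x, y) 0 + cnt1 bl x y := by
      intro c
      have h := B_ballot_fold_getD bl [] c x y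
      simpa [counter, cnt1] using h
    rw [ih, hb0]
    simp only [List.map_cons, List.sum_cons]
    ring

lemma keys_foldl_insert_map {κ ν β : Type} [BEq κ] [LawfulBEq κ] (l : List β) (key : β → κ)
    (v : PySem.Dict κ ν → β → ν) (d : PySem.Dict κ ν) :
    (l.foldl (fun d x => d.insert (key x) (v d x)) d).keys
      = (l.map key).foldl PySem.Set.add d.keys := by
  induction l generalizing d with
  | nil => simp
  | cons x t ih =>
    rw [List.foldl_cons, List.map_cons, List.foldl_cons, ih]
    congr 1
    by_cases hc : d.contains (key x)
    · rw [PySem.Dict.keys_insert_of_contains _ _ hc]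
      have hm : d.keys.contains (key x) = true := by
        rw [List.contains_eq_mem]
        simpa using (PySem.Dict.contains_iff_mem_keys d (key x)).mp hc
      show _ = if d.keys.contains (key x) then d.keys else d.keys ++ [key x]
      rw [hm]
      simp
    · have hc' : d.contains (key x) = false := Bool.eq_false_iff.mpr hc
      rw [PySem.Dict.keys_insert_of_not_contains _ _ hc']
      have hm : d.keys.contains (key x) = false := by
        rw [Bool.eq_false_iff, List.contains_eq_mem]
        intro hmm
        exact hc ((PySem.Dict.contains_iff_mem_keys d (key x)).mpr (by simpa using hmm))
      show _ = if d.keys.contains (key x) then d.keys else d.keys ++ [key x]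
      rw [hm]
      simp

lemma mem_foldl_add {α : Type} [BEq α] [LawfulBEq α] (l : List α) (s : PySem.Set α) (y : α) :
    y ∈ l.foldl PySem.Set.add s ↔ y ∈ s ∨ y ∈ l :=
  PySem.Set.mem_update s l y

lemma filter_set_add (q : String → Bool) (acc : List String) (x : String) :
    (PySem.Set.add acc x).filter q
      = if q x then PySem.Set.add (acc.filter q) x else acc.filter q := by
  show (if acc.contains x then acc else acc ++ [x]).filter q
      = if q x then (if (acc.filter q).contains x then acc.filter q else acc.filter q ++ [x])
        else acc.filter q
  by_cases hc : x ∈ acc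
  · have h1 : acc.contains x = true := by rw [List.contains_eq_mem]; simpa using hc
    rw [h1]
    by_cases hq : q x
    · have h2 : (acc.filter q).contains x = true := by
        rw [List.contains_eq_mem]
        simp [List.mem_filter, hc, hq]
      simp [hq, hc]
    · simp [hq]
  · have h1 : acc.contains x = false := by
      rw [Bool.eq_false_iff, List.contains_eq_mem]
      simpa using hc
    rw [h1]
    simp only [Bool.false_eq_true, if_false]
    by_cases hq : q x
    · have h2 : (acc.filter q).contains x = false := by
        rw [Bool.eq_false_iff, List.contains_eq_mem]
        simp [List.mem_filter, hc]
      rw [List.filter_append]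
      simp [hq, hc]
    · rw [List.filter_append]
      simp [hq]

lemma foldl_add_filter (q : String → Bool) (l : List String) :
    ∀ acc : List String, (l.foldl PySem.Set.add acc).filter q
      = (l.filter q).foldl PySem.Set.add (acc.filter q) := by
  induction l with
  | nil => intro acc; simp
  | cons x t ih =>
    intro acc
    rw [List.foldl_cons, ih, List.filter_cons]
    by_cases hq : q x
    · rw [if_pos hq, List.foldl_cons, filter_set_add, if_pos hq]
    · rw [if_neg hq, filter_set_add, if_neg hq]

lemma ofList_filter (q : String → Bool) (l : List String) :
    PySem.Set.ofList (l.filter q) = (PySem.Set.ofList l).filter q := by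
  have h := foldl_add_filter q l []
  simpa [PySem.Set.ofList, PySem.Set.empty] using h.symm

lemma zeros_getD (options : List String) (k : String) :
    (options.foldl (fun d b => d.insert b (0 : Int)) PySem.Dict.empty).getD k 0 = 0 := by
  suffices h : ∀ d : PySem.Dict String Int, d.getD k 0 = 0 →
      (options.foldl (fun d b => d.insert b (0 : Int)) d).getD k 0 = 0 from
    h _ (by simp)
  induction options with
  | nil => intro d h; simpa using h
  | cons x t ih =>
    intro d h
    rw [List.foldl_cons]
    apply ih
    rw [PySem.Dict.getD_insert]
    by_cases hk : k = x
    · simp [hk]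
    · simpa [hk] using h

lemma zeros_keys (options : List String) :
    (options.foldl (fun d b => d.insert b (0 : Int)) PySem.Dict.empty).keys
      = PySem.Set.ofList options := by
  rw [keys_foldl_insert_map options (fun b => b) (fun _ _ => (0 : Int)) PySem.Dict.empty]
  simp [PySem.Set.ofList, PySem.Dict.keys_empty, PySem.Set.empty]

lemma zeros_nodup (options : List String) :
    (options.foldl (fun d b => d.insert b (0 : Int)) PySem.Dict.empty).keys.Nodup :=
  PySem.Dict.nodup_keys_foldl_insert options (fun _ _ => (0 : Int)) _ PySem.Dict.nodup_keys_empty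

lemma innerF_keys_ofList (options : List String) (f : String → String → Int) (a : String) :
    (innerF options f a).keys
      = (PySem.Set.ofList options).filter (fun k => !k == a) := by
  unfold innerF
  rw [PySem.List.foldl_ite_eq_foldl_filter (fun b => b ≠ a)
    (fun d b => d.insert b (f a b)) options PySem.Dict.empty]
  rw [keys_foldl_insert_map _ (fun b => b) (fun _ b => f a b) PySem.Dict.empty]
  rw [List.map_id', PySem.Dict.keys_empty]
  rw [show (List.foldl PySem.Set.add [] (options.filter (fun x => decide (x ≠ a))))
      = PySem.Set.ofList (options.filter (fun x => decide (x ≠ a))) from rfl]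
  rw [ofList_filter]
  apply List.filter_congr
  intro x _
  by_cases hxa : x = a <;> simp [hxa]

lemma zeros_erase_innerF (options : List String) (a : String) :
    (options.foldl (fun d b => d.insert b (0 : Int)) PySem.Dict.empty).erase a
      = innerF options (fun _ _ => 0) a := by
  apply PySem.Dict.ext
  have hz : (options.foldl (fun d b => d.insert b (0 : Int)) PySem.Dict.empty).items
      = (PySem.Set.ofList options).map (fun k => (k, (0 : Int))) := by
    rw [PySem.Dict.items_eq_map_keys _ (zeros_nodup options) 0, zeros_keys]
    apply List.map_congr_left
    intro k _
    rw [zeros_getD]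
  have hL : ((options.foldl (fun d b => d.insert b (0 : Int)) PySem.Dict.empty).erase a).items
      = ((PySem.Set.ofList options).filter (fun k => !k == a)).map (fun k => (k, (0 : Int))) := by
    show (options.foldl (fun d b => d.insert b (0 : Int)) PySem.Dict.empty).items.filter
        (fun p => !p.1 == a) = _
    rw [hz, List.filter_map]
    rfl
  rw [hL, PySem.Dict.items_eq_map_keys _ (innerF_nodup options (fun _ _ => 0) a) 0,
    innerF_keys_ofList]
  apply List.map_congr_left
  intro k _
  rw [innerF_getD]
  simp

/-- Set f at the single cell (a, b) to the value c. -/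
def bumpSet (f : String → String → Int) (a b : String) (c : Int) : String → String → Int :=
  fun x y => if x = a ∧ y = b then c else f x y

lemma innerF_insert (opts : List String) (f : String → String → Int) (a b : String) (c : Int)
    (hb : b ∈ opts) (hba : b ≠ a) :
    (innerF opts f a).insert b c = innerF opts (bumpSet f a b c) a := by
  have hkeysins : ((innerF opts f a).insert b c).keys = (innerF opts f a).keys :=
    PySem.Dict.keys_insert_of_contains _ _ (by rw [innerF_contains]; simp [hb, hba])
  apply PySem.Dict.ext
  rw [PySem.Dict.items_eq_map_keys _ (by rw [hkeysins]; exact innerF_nodup opts f a) 0,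
      PySem.Dict.items_eq_map_keys _ (innerF_nodup opts (bumpSet f a b c) a) 0, hkeysins,
      innerF_keys opts f (bumpSet f a b c) a]
  apply List.map_congr_left
  intro k hk
  have hkm : k ∈ opts ∧ k ≠ a := by
    rw [← PySem.Dict.contains_iff_mem_keys, innerF_contains] at hk
    exact of_decide_eq_true hk
  congr 1
  rw [PySem.Dict.getD_insert, innerF_getD, innerF_getD, if_pos hkm, if_pos hkm, bumpSet]
  by_cases hkb : k = b
  · subst hkb
    simp
  · simp [hkb]

lemma buildM_set (opts : List String) (f : String → String → Int) (a b : String) (c : Int)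
    (ha : a ∈ opts) (hb : b ∈ opts) (hba : b ≠ a) :
    (buildM opts f).modify a PySem.Dict.empty (fun row => row.insert b c)
      = buildM opts (bumpSet f a b c) := by
  have hkeysmod : ((buildM opts f).modify a PySem.Dict.empty
      (fun row => row.insert b c)).keys = (buildM opts f).keys := by
    rw [PySem.Dict.keys_modify]
    apply PySem.Dict.keys_insert_of_contains
    rw [buildM_contains]
    simpa using ha
  apply PySem.Dict.ext
  rw [PySem.Dict.items_eq_map_keys _ (by rw [hkeysmod]; exact buildM_nodup opts f)
        PySem.Dict.empty,
      PySem.Dict.items_eq_map_keys _ (buildM_nodup opts (bumpSet f a b c)) PySem.Dict.empty,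
      hkeysmod, buildM_keys opts f (bumpSet f a b c)]
  apply List.map_congr_left
  intro k hk
  have hkm : k ∈ opts := by
    rw [← PySem.Dict.contains_iff_mem_keys, buildM_contains] at hk
    exact of_decide_eq_true hk
  congr 1
  rw [PySem.Dict.getD_modify, buildM_getD opts (bumpSet f a b c) k hkm]
  by_cases hka : k = a
  · subst hka
    rw [if_pos rfl, buildM_getD opts f k hkm, innerF_insert opts f k b c hb hba]
  · rw [if_neg hka, buildM_getD opts f k hkm]
    apply innerF_congr
    intro y hy hyk
    rw [bumpSet]
    simp [hka]

/-- The function described by overlaying the (a, b) ↦ c cell-settings of l onto g. -/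
def overF (l : List ((String × String) × Int)) (g : String → String → Int) :
    String → String → Int :=
  l.foldl (fun g kc => if kc.1.1 ≠ kc.1.2 then bumpSet g kc.1.1 kc.1.2 kc.2 else g) g

lemma overlay_buildM (options : List String) (l : List ((String × String) × Int)) :
    ∀ g : String → String → Int,
    (∀ kc ∈ l, kc.1.1 ∈ options ∧ kc.1.2 ∈ options) →
    l.foldl (fun m kc =>
        if kc.1.1 ≠ kc.1.2 then
          m.modify kc.1.1 PySem.Dict.empty (fun row => row.insert kc.1.2 kc.2)
        else m) (buildM options g)
      = buildM options (overF l g) := by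
  induction l with
  | nil => intro g _; simp [overF]
  | cons kc t ih =>
    intro g h
    rw [List.foldl_cons]
    have hh := h kc List.mem_cons_self
    by_cases hne : kc.1.1 ≠ kc.1.2
    · rw [if_pos hne, buildM_set options g kc.1.1 kc.1.2 kc.2 hh.1 hh.2 (Ne.symm hne),
        ih (bumpSet g kc.1.1 kc.1.2 kc.2) (fun kc' hk => h kc' (List.mem_cons_of_mem _ hk))]
      have hov : overF (kc :: t) g = overF t (bumpSet g kc.1.1 kc.1.2 kc.2) := by
        simp only [overF, List.foldl_cons]
        rw [if_pos hne]
      rw [hov]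
    · rw [if_neg hne, ih g (fun kc' hk => h kc' (List.mem_cons_of_mem _ hk))]
      have hov : overF (kc :: t) g = overF t g := by
        simp only [overF, List.foldl_cons]
        rw [if_neg hne]
      rw [hov]

lemma overF_val (l : List ((String × String) × Int)) (x y : String) (hxy : x ≠ y) :
    ∀ g : String → String → Int, (l.map (fun kc => kc.1)).Nodup →
    overF l g x y
      = ((l.find? (fun kc => kc.1 == (x, y))).map (fun kc => kc.2)).getD (g x y) := by
  induction l with
  | nil => intro g _; simp [overF]
  | cons kc t ih =>
    intro g hnd
    rw [List.map_cons, List.nodup_cons] at hnd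
    have hover : overF (kc :: t) g
        = overF t (if kc.1.1 ≠ kc.1.2 then bumpSet g kc.1.1 kc.1.2 kc.2 else g) := rfl
    rw [hover]
    by_cases hk : kc.1 = (x, y)
    · have hfind : (kc :: t).find? (fun kc => kc.1 == (x, y)) = some kc := by
        rw [List.find?_cons_of_pos]
        simp [hk]
      rw [hfind, ih _ hnd.2]
      have hnone : t.find? (fun kc => kc.1 == (x, y)) = none := by
        rw [List.find?_eq_none]
        intro kc' hk'
        simp only [beq_iff_eq]
        intro hkk
        apply hnd.1
        rw [hk, ← hkk]
        exact List.mem_map_of_mem hk' 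
      rw [hnone]
      have hne : kc.1.1 ≠ kc.1.2 := by
        rw [hk]
        exact hxy
      rw [if_pos hne]
      simp only [Option.map_some, Option.getD_some, Option.map_none, Option.getD_none, bumpSet]
      have : x = kc.1.1 ∧ y = kc.1.2 := by rw [hk]; exact ⟨rfl, rfl⟩
      rw [if_pos this]
    · have hfind : (kc :: t).find? (fun kc => kc.1 == (x, y))
          = t.find? (fun kc => kc.1 == (x, y)) := by
        rw [List.find?_cons_of_neg]
        simp [hk]
      rw [hfind, ih _ hnd.2]
      congr 1
      by_cases hne : kc.1.1 ≠ kc.1.2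
      · rw [if_pos hne, bumpSet]
        have : ¬ (x = kc.1.1 ∧ y = kc.1.2) := by
          rintro ⟨h1, h2⟩
          exact hk (Prod.ext_iff.mpr ⟨h1.symm, h2.symm⟩)
        rw [if_neg this]
      · rw [if_neg hne]

lemma cnt1_filter (l : List String) (p : String → Bool) (a b : String)
    (ha : p a = true) (hb : p b = true) :
    cnt1 (l.filter p) a b = cnt1 l a b := by
  induction l with
  | nil => simp
  | cons z t ih =>
    rw [List.filter_cons]
    by_cases hz : p z
    · rw [if_pos hz]
      simp only [cnt1]
      rw [ih, List.count_filter hb]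
    · rw [if_neg hz]
      simp only [cnt1]
      rw [ih]
      have hza : ¬ z = a := by
        intro h
        rw [h, ha] at hz
        exact hz rfl
      simp [hza]

lemma keys_items_fold (b : String) (l : List (String × Int))
    (counts : PySem.Dict (String × String) Int) :
    (l.foldl (fun c ac => c.insert (ac.1, b) (c.getD (ac.1, b) 0 + ac.2)) counts).keys
      = (l.map (fun ac => (ac.1, b))).foldl PySem.Set.add counts.keys :=
  keys_foldl_insert_map l (fun ac => (ac.1, b))
    (fun c ac => c.getD (ac.1, b) 0 + ac.2) counts

lemma counter_keys_mem (p : List String) (x : String) (hx : x ∈ (counter p).keys) : x ∈ p := by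
  rw [counter, keys_foldl_insert_map p (fun b => b) (fun d z => d.getD z 0 + 1)
    PySem.Dict.empty] at hx
  rw [List.map_id', PySem.Dict.keys_empty] at hx
  rcases (mem_foldl_add p [] x).mp hx with h | h
  · cases h
  · exact h

lemma B_ballot_keys (options : List String) (rest : List String) :
    ∀ (p : List String) (counts : PySem.Dict (String × String) Int),
    (∀ k ∈ counts.keys, k.1 ∈ options ∧ k.2 ∈ options) →
    (∀ b ∈ rest, b ∈ options) → (∀ b ∈ p, b ∈ options) →
    ∀ k ∈ ((rest.foldl
        (fun (st : PySem.Dict (String × String) Int × PySem.Dict String Int) b =>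
          (st.2.items.foldl (fun c ac => c.insert (ac.1, b) (c.getD (ac.1, b) 0 + ac.2)) st.1,
           st.2.insert b (st.2.getD b 0 + 1)))
        (counts, counter p)).1).keys, k.1 ∈ options ∧ k.2 ∈ options := by
  induction rest with
  | nil => intro p counts hc _ _ k hk; exact hc k hk
  | cons b rest' ih =>
    intro p counts hc hrest hp
    simp only [List.foldl_cons]
    rw [← counter_append_singleton p b]
    apply ih (p ++ [b])
    · intro k hk
      rw [keys_items_fold b (counter p).items counts] at hk
      rcases (mem_foldl_add _ _ k).mp hk with h | h
      · exact hc k h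
      · rcases List.mem_map.mp h with ⟨ac, hac, hkeq⟩
        subst hkeq
        constructor
        · exact hp _ (counter_keys_mem p ac.1 (List.mem_map_of_mem hac))
        · exact hrest b List.mem_cons_self
    · intro b' hb'
      exact hrest b' (List.mem_cons_of_mem _ hb')
    · intro b' hb'
      rcases List.mem_append.mp hb' with h | h
      · exact hp b' h
      · rw [List.mem_singleton.mp h]
        exact hrest b List.mem_cons_self

lemma B_ballot_nodup (rest : List String) :
    ∀ (p : List String) (counts : PySem.Dict (String × String) Int),
    counts.keys.Nodup →
    ((rest.foldl
        (fun (st : PySem.Dict (String × String) Int × PySem.Dict String Int) b =>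
          (st.2.items.foldl (fun c ac => c.insert (ac.1, b) (c.getD (ac.1, b) 0 + ac.2)) st.1,
           st.2.insert b (st.2.getD b 0 + 1)))
        (counts, counter p)).1).keys.Nodup := by
  induction rest with
  | nil => intro p counts hc; exact hc
  | cons b rest' ih =>
    intro p counts hc
    simp only [List.foldl_cons]
    rw [← counter_append_singleton p b]
    apply ih (p ++ [b])
    exact PySem.Dict.nodup_keys_foldl_insert_key (counter p).items
      (fun ac : String × Int => (ac.1, b))
      (fun c ac => c.getD (ac.1, b) 0 + ac.2) counts hc

lemma B_counts_keys (options : List String) (ballots' : List (List String)) :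
    ∀ counts : PySem.Dict (String × String) Int,
    (∀ k ∈ counts.keys, k.1 ∈ options ∧ k.2 ∈ options) →
    (∀ bl ∈ ballots', ∀ b ∈ bl, b ∈ options) →
    ∀ k ∈ (ballots'.foldl (fun counts ballot =>
        (ballot.foldl
          (fun (st : PySem.Dict (String × String) Int × PySem.Dict String Int) b =>
            (st.2.items.foldl (fun c ac => c.insert (ac.1, b) (c.getD (ac.1, b) 0 + ac.2)) st.1,
             st.2.insert b (st.2.getD b 0 + 1)))
          (counts, PySem.Dict.empty)).1) counts).keys, k.1 ∈ options ∧ k.2 ∈ options := by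
  induction ballots' with
  | nil => intro counts hc _ k hk; exact hc k hk
  | cons bl rest ih =>
    intro counts hc hbl
    simp only [List.foldl_cons]
    apply ih
    · exact B_ballot_keys options bl [] counts hc (hbl bl List.mem_cons_self)
        (fun b h => absurd h (List.not_mem_nil))
    · intro bl' h
      exact hbl bl' (List.mem_cons_of_mem _ h)

lemma B_counts_nodup (ballots' : List (List String)) :
    ∀ counts : PySem.Dict (String × String) Int, counts.keys.Nodup →
    (ballots'.foldl (fun counts ballot =>
        (ballot.foldl
          (fun (st : PySem.Dict (String × String) Int × PySem.Dict String Int) b =>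
            (st.2.items.foldl (fun c ac => c.insert (ac.1, b) (c.getD (ac.1, b) 0 + ac.2)) st.1,
             st.2.insert b (st.2.getD b 0 + 1)))
          (counts, PySem.Dict.empty)).1) counts).keys.Nodup := by
  induction ballots' with
  | nil => intro counts hc; exact hc
  | cons bl rest ih =>
    intro counts hc
    simp only [List.foldl_cons]
    exact ih _ (B_ballot_nodup bl [] counts hc)

-- ===== VERDICT (by name: the statement is the Claim_ definition above) =====
theorem pairwise_matrix_spec : Claim_equal_pairwise_matrix := by
  intro ballots options _
  unfold Spec_pairwise_matrix
  have hA : pairwise_matrix ballots options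
      = (buildM options (fun x y =>
          (0 : Int) + if x ∈ options ∧ y ∈ options ∧ y ≠ x
            then ((ballots.map (fun bl => cnt1 bl x y)).sum) else 0)).items.map
          (fun p => (p.1, p.2.items)) := by
    simp only [pairwise_matrix]
    rw [show (options.foldl (fun m a =>
          m.insert a (options.foldl (fun d b => if b ≠ a then d.insert b (0 : Int) else d)
            PySem.Dict.empty)) PySem.Dict.empty)
        = buildM options (fun _ _ => 0) from rfl]
    rw [A_ballots_fold]
  have hguard : ∀ (counts : PySem.Dict (String × String) Int) (ballot : List String),
      (ballot.foldl
        (fun (st : PySem.Dict (String × String) Int × PySem.Dict String Int) b =>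
          if (PySem.List.dedup options).contains b then
            (st.2.items.foldl (fun c ac => c.insert (ac.1, b) (c.getD (ac.1, b) 0 + ac.2)) st.1,
             st.2.insert b (st.2.getD b 0 + 1))
          else st)
        (counts, PySem.Dict.empty)).1
      = ((ballot.filter (fun b => decide (b ∈ options))).foldl
          (fun (st : PySem.Dict (String × String) Int × PySem.Dict String Int) b =>
            (st.2.items.foldl (fun c ac => c.insert (ac.1, b) (c.getD (ac.1, b) 0 + ac.2)) st.1,
             st.2.insert b (st.2.getD b 0 + 1)))
          (counts, PySem.Dict.empty)).1 := by
    intro counts ballot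
    rw [PySem.List.foldl_if_eq_foldl_filter (fun b => (PySem.List.dedup options).contains b)
      (fun (st : PySem.Dict (String × String) Int × PySem.Dict String Int) b =>
        (st.2.items.foldl (fun c ac => c.insert (ac.1, b) (c.getD (ac.1, b) 0 + ac.2)) st.1,
         st.2.insert b (st.2.getD b 0 + 1))) ballot (counts, PySem.Dict.empty)]
    congr 2
    apply List.filter_congr
    intro x _
    rw [List.contains_eq_mem]
    apply decide_eq_decide.mpr
    exact PySem.List.mem_dedup options x
  have hB : pairwise_matrix_alt ballots options
      = (buildM options (overF
          (((ballots.map (fun bl => bl.filter (fun b => decide (b ∈ options)))).foldl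
            (fun counts ballot =>
              (ballot.foldl
                (fun (st : PySem.Dict (String × String) Int × PySem.Dict String Int) b =>
                  (st.2.items.foldl
                    (fun c ac => c.insert (ac.1, b) (c.getD (ac.1, b) 0 + ac.2)) st.1,
                   st.2.insert b (st.2.getD b 0 + 1)))
                (counts, PySem.Dict.empty)).1) PySem.Dict.empty).items)
          (fun _ _ => 0))).items.map (fun p => (p.1, p.2.items)) := by
    simp only [pairwise_matrix_alt]
    have h1 : (ballots.foldl (fun counts ballot =>
          (ballot.foldl
            (fun (st : PySem.Dict (String × String) Int × PySem.Dict String Int) b =>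
              if (PySem.List.dedup options).contains b then
                (st.2.items.foldl
                  (fun c ac => c.insert (ac.1, b) (c.getD (ac.1, b) 0 + ac.2)) st.1,
                 st.2.insert b (st.2.getD b 0 + 1))
              else st)
            (counts, PySem.Dict.empty)).1) PySem.Dict.empty)
        = ((ballots.map (fun bl => bl.filter (fun b => decide (b ∈ options)))).foldl
            (fun counts ballot =>
              (ballot.foldl
                (fun (st : PySem.Dict (String × String) Int × PySem.Dict String Int) b =>
                  (st.2.items.foldl
                    (fun c ac => c.insert (ac.1, b) (c.getD (ac.1, b) 0 + ac.2)) st.1,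
                   st.2.insert b (st.2.getD b 0 + 1)))
                (counts, PySem.Dict.empty)).1) PySem.Dict.empty) := by
      rw [List.foldl_map]
      exact PySem.List.foldl_congr_mem _ _ _ _ (fun acc ballot _ => hguard acc ballot)
    rw [h1]
    have h2 : (options.foldl (fun m a =>
          m.insert a ((options.foldl (fun d b => d.insert b (0 : Int))
            PySem.Dict.empty).erase a)) PySem.Dict.empty)
        = buildM options (fun _ _ => 0) :=
      PySem.List.foldl_congr_mem _ _ _ _ (fun m a _ => by rw [zeros_erase_innerF])
    rw [h2]
    have hmem : ∀ kc ∈ ((ballots.map (fun bl =>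
          bl.filter (fun b => decide (b ∈ options)))).foldl
            (fun counts ballot =>
              (ballot.foldl
                (fun (st : PySem.Dict (String × String) Int × PySem.Dict String Int) b =>
                  (st.2.items.foldl
                    (fun c ac => c.insert (ac.1, b) (c.getD (ac.1, b) 0 + ac.2)) st.1,
                   st.2.insert b (st.2.getD b 0 + 1)))
                (counts, PySem.Dict.empty)).1) PySem.Dict.empty).items,
        kc.1.1 ∈ options ∧ kc.1.2 ∈ options := by
      intro kc hkc
      refine B_counts_keys options _ PySem.Dict.empty (by simp [PySem.Dict.keys_empty]) ?_
        kc.1 (List.mem_map_of_mem hkc)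
      intro bl hbl b hb
      rcases List.mem_map.mp hbl with ⟨bl0, _, rfl⟩
      exact of_decide_eq_true (List.mem_filter.mp hb).2
    rw [overlay_buildM options _ (fun _ _ => 0) hmem]
  rw [hA, hB]
  refine congrArg (fun m : PySem.Dict String (PySem.Dict String Int) =>
    m.items.map (fun p => (p.1, p.2.items))) ?_
  apply buildM_congr
  intro a ha b hb hba
  have hnd : (((ballots.map (fun bl => bl.filter (fun b => decide (b ∈ options)))).foldl
        (fun counts ballot =>
          (ballot.foldl
            (fun (st : PySem.Dict (String × String) Int × PySem.Dict String Int) b =>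
              (st.2.items.foldl
                (fun c ac => c.insert (ac.1, b) (c.getD (ac.1, b) 0 + ac.2)) st.1,
               st.2.insert b (st.2.getD b 0 + 1)))
            (counts, PySem.Dict.empty)).1) PySem.Dict.empty).items.map
          (fun kc => kc.1)).Nodup :=
    B_counts_nodup _ PySem.Dict.empty (by simp [PySem.Dict.keys_empty])
  rw [overF_val _ a b (Ne.symm hba) (fun _ _ => 0) hnd]
  have hcast : ((((ballots.map (fun bl => bl.filter (fun b => decide (b ∈ options)))).foldl
        (fun counts ballot =>
          (ballot.foldl
            (fun (st : PySem.Dict (String × String) Int × PySem.Dict String Int) b =>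
              (st.2.items.foldl
                (fun c ac => c.insert (ac.1, b) (c.getD (ac.1, b) 0 + ac.2)) st.1,
               st.2.insert b (st.2.getD b 0 + 1)))
            (counts, PySem.Dict.empty)).1) PySem.Dict.empty).items.find?
        (fun kc => kc.1 == (a, b))).map (fun kc => kc.2)).getD ((fun _ _ => (0 : Int)) a b)
      = ((ballots.map (fun bl => bl.filter (fun b => decide (b ∈ options)))).foldl
        (fun counts ballot =>
          (ballot.foldl
            (fun (st : PySem.Dict (String × String) Int × PySem.Dict String Int) b =>
              (st.2.items.foldl
                (fun c ac => c.insert (ac.1, b) (c.getD (ac.1, b) 0 + ac.2)) st.1,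
               st.2.insert b (st.2.getD b 0 + 1)))
            (counts, PySem.Dict.empty)).1) PySem.Dict.empty).getD (a, b) 0 := rfl
  rw [hcast]
  rw [B_counts_getD _ PySem.Dict.empty a b, PySem.Dict.getD_empty, List.map_map]
  have hmapeq : ballots.map ((fun bl => cnt1 bl a b) ∘
        (fun bl => bl.filter (fun x => decide (x ∈ options))))
      = ballots.map (fun bl => cnt1 bl a b) := by
    apply List.map_congr_left
    intro bl _
    exact cnt1_filter bl _ a b (decide_eq_true ha) (decide_eq_true hb)
  rw [hmapeq]
  simp [ha, hb, hba]
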